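-- pv_equiv track=rewrite | github.com/15680676726/superSpider | src/copaw/compiler/planning/cycle_planner.py | _review_pressure_score
-- ===== SOURCE A (Python) =====
-- def _review_pressure_score(pressure: object | None) -> int:
--     text = str(pressure or "").strip().lower()
--     if any(token in text for token in ("critical", "urgent", "high", "catch")):
--         return 3
--     if any(token in text for token in ("steady", "normal", "medium")):
--         return 2
--     if any(token in text for token in ("throttle", "hold", "defer", "low")):
--         return 1
--     return 0
-- ===== SOURCE B (Python) =====
-- _TOKEN_SCORES = [
--     ("critical", 3), ("urgent", 3), ("high", 3), ("catch", 3),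
--     ("steady", 2), ("normal", 2), ("medium", 2),
--     ("throttle", 1), ("hold", 1), ("defer", 1), ("low", 1),
-- ]
--
--
-- def _review_pressure_score(pressure):
--     text = str(pressure or "").strip().lower()
--     return max((score for token, score in _TOKEN_SCORES if token in text), default=0)
-- ===== Notes on version B (the rewrite author's own statement) =====
-- stated objective: simpler
-- what changed: Replaces the three ordered any()-with-early-return tiers by a single max-reduction over one flat token->score table; equivalent because the tier scores are strictly descending, so the max of all matching scores equals the first matching tier.
import Mathlib
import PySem

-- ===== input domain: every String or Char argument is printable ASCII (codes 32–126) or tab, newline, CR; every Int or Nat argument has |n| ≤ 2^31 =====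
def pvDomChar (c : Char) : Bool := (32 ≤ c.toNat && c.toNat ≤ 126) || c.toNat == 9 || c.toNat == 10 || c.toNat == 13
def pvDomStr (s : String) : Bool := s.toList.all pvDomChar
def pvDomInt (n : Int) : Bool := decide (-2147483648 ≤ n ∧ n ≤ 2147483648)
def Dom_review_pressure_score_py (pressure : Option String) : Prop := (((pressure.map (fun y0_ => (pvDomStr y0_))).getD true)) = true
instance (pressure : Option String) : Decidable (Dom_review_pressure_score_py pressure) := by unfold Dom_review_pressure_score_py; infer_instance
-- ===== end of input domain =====

-- B replaces A's three ordered any()-tiers by a single max-reduction over one flat token->score table (simpler decomposition, same cost).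


-- ===== PORT A =====
-- 'pressure or ""' : None -> "", and an empty string stays empty, so it is getD ""
def review_pressure_score_py (pressure : Option String) : Int :=
  let text := PySem.Str.lower (PySem.Str.strip (pressure.getD ""))
  if ["critical", "urgent", "high", "catch"].any (fun token => PySem.Str.isIn token text) then 3
  else if ["steady", "normal", "medium"].any (fun token => PySem.Str.isIn token text) then 2
  else if ["throttle", "hold", "defer", "low"].any (fun token => PySem.Str.isIn token text) then 1
  else 0

-- ===== PORT B =====
def pvTokenScores : List (String × Int) :=
  [("critical", 3), ("urgent", 3), ("high", 3), ("catch", 3),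
   ("steady", 2), ("normal", 2), ("medium", 2),
   ("throttle", 1), ("hold", 1), ("defer", 1), ("low", 1)]

-- max(generator, default=0) as a left fold over the table
def review_pressure_score_py_alt (pressure : Option String) : Int :=
  let text := PySem.Str.lower (PySem.Str.strip (pressure.getD ""))
  pvTokenScores.foldl (fun m p => if PySem.Str.isIn p.1 text then max m p.2 else m) 0

-- ===== PRECONDITION & SPEC =====
def Spec_review_pressure_score_py (pressure : Option String) (out : Int) : Prop := out = review_pressure_score_py_alt pressure
instance (pressure : Option String) (out : Int) : Decidable (Spec_review_pressure_score_py pressure out) := by unfold Spec_review_pressure_score_py; infer_instance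

-- ===== CLAIM (what is proved, stated in full; the proofs are below) =====
def Claim_equal_review_pressure_score_py : Prop := ∀ (pressure : Option String), Dom_review_pressure_score_py pressure → Spec_review_pressure_score_py pressure (review_pressure_score_py pressure)

-- ===== LEMMAS AND PROOFS =====
-- One tier of the table (all tokens sharing score s) folds to 'max m0 s' iff some token matches.
theorem pv_fold_tier (t : String) (toks : List String) (s : Int) (m0 : Int) :
    (toks.map (fun tok => (tok, s))).foldl
      (fun m p => if PySem.Str.isIn p.1 t then max m p.2 else m) m0
    = if toks.any (fun token => PySem.Str.isIn token t) then max m0 s else m0 := by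
  induction toks generalizing m0 with
  | nil => simp
  | cons x xs ih =>
    by_cases hx : PySem.Str.isIn x t = true
    · simp only [List.map, List.foldl, List.any, hx, if_pos, Bool.true_or, ih]
      split <;> simp [max_assoc, -PySem.Str.isIn_eq]
    · simp [hx, ih, -PySem.Str.isIn_eq]

-- Both programs are the same function of the processed text; prove equality for every text.
theorem pv_core_eq (t : String) :
    (if ["critical", "urgent", "high", "catch"].any (fun token => PySem.Str.isIn token t) then (3 : Int)
     else if ["steady", "normal", "medium"].any (fun token => PySem.Str.isIn token t) then 2
     else if ["throttle", "hold", "defer", "low"].any (fun token => PySem.Str.isIn token t) then 1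
     else 0)
    = pvTokenScores.foldl (fun m p => if PySem.Str.isIn p.1 t then max m p.2 else m) 0 := by
  have htab : pvTokenScores
      = (["critical", "urgent", "high", "catch"].map (fun tok => (tok, (3 : Int))))
        ++ (["steady", "normal", "medium"].map (fun tok => (tok, (2 : Int))))
        ++ (["throttle", "hold", "defer", "low"].map (fun tok => (tok, (1 : Int)))) := by rfl
  rw [htab, List.foldl_append, List.foldl_append, pv_fold_tier, pv_fold_tier, pv_fold_tier]
  by_cases h3 : ["critical", "urgent", "high", "catch"].any (fun token => PySem.Str.isIn token t) = true <;>
  by_cases h2 : ["steady", "normal", "medium"].any (fun token => PySem.Str.isIn token t) = true <;>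
  by_cases h1 : ["throttle", "hold", "defer", "low"].any (fun token => PySem.Str.isIn token t) = true <;>
  simp [h1, h2, h3, -PySem.Str.isIn_eq]

-- ===== VERDICT (by name: the statement is the Claim_ definition above) =====
theorem review_pressure_score_py_spec : Claim_equal_review_pressure_score_py := by
  intro pressure _
  unfold Spec_review_pressure_score_py review_pressure_score_py review_pressure_score_py_alt
  exact pv_core_eq _
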